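-- pv_equiv track=rewrite | github.com/talestsp/recsys_challenge_2018 | src/scripts/similar_playlists_multi_thread.py | dataset_slices
-- ===== SOURCE A (Python) =====
-- import math
--
-- def dataset_slices(from_pid, to_pid, n_threads):
--     '''
--     Builds a list of ranges that each thread will apply to dataset
--     :param n_cpus: number of CPUs to be in parallelized
--     :param playtrack: DataFrame of play_track.csv
--     :param from_pid:
--     :param to_pid:
--     :return:
--     '''
--     range_len = to_pid - from_pid
--     current_from_pid = from_pid
--
--     dataset_range = int(math.ceil(range_len / n_threads))
--     ranges = []
--
--
--     for i in range(n_threads - 1):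
--         current_to_pid = current_from_pid + dataset_range
--         ranges.append({"from_pid": current_from_pid,
--                        "to_pid": current_to_pid})
--         current_from_pid = current_to_pid + 1
--
--     #create a task for the missing rounds
--     ranges.append({"from_pid": current_from_pid, "to_pid": to_pid})
--     return ranges
-- ===== SOURCE B (Python) =====
-- def dataset_slices(from_pid, to_pid, n_threads):
--     # closed-form slice boundaries: no running accumulator
--     d = -((from_pid - to_pid) // n_threads)  # = ceil((to_pid - from_pid) / n_threads)
--     slices = [{"from_pid": from_pid + i * (d + 1), "to_pid": from_pid + i * (d + 1) + d}
--               for i in range(n_threads - 1)]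
--     last_from = from_pid + max(n_threads - 1, 0) * (d + 1)
--     slices.append({"from_pid": last_from, "to_pid": to_pid})
--     return slices
-- ===== Notes on version B (the rewrite author's own statement) =====
-- stated objective: alternative
-- what changed: B computes each slice's bounds by a closed-form per-index formula (from_pid + i*(d+1)) with integer ceiling division instead of A's float math.ceil and mutable running current_from_pid accumulator.
import Mathlib
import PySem

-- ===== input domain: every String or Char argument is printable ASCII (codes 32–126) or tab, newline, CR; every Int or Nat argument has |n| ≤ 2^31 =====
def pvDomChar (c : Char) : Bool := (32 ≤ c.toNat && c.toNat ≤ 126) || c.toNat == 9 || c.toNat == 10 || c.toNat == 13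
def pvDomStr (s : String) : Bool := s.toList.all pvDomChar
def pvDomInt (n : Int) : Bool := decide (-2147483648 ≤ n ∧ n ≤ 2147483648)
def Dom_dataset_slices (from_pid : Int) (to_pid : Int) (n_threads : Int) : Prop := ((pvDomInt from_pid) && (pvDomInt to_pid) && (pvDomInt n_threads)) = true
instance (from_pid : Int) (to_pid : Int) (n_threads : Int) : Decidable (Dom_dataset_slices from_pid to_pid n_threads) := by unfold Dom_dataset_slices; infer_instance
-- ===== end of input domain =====

-- B replaces A's running current_from_pid accumulator with closed-form per-index slice
-- boundaries (objective: alternative decomposition; no speed claim).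

-- ===== PORT A =====
-- int(math.ceil(range_len / n_threads)) is ported as integer ceiling division
-- -((-range_len) // n_threads); exact on the stated domain (|range_len| ≤ 2^32,
-- |n_threads| ≤ 2^31, so the float quotient cannot round across an integer).
def dataset_slices (from_pid : Int) (to_pid : Int) (n_threads : Int) : List (List (String × Int)) :=
  let range_len := to_pid - from_pid
  let dataset_range := -(PySem.Int.floordiv (-range_len) n_threads)
  let st := (PySem.List.pyRange 0 (n_threads - 1) 1).foldl
    (fun (st : Int × List (List (String × Int))) _i =>
      let current_to_pid := st.1 + dataset_range
      (current_to_pid + 1, st.2 ++ [[("from_pid", st.1), ("to_pid", current_to_pid)]]))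
    (from_pid, [])
  st.2 ++ [[("from_pid", st.1), ("to_pid", to_pid)]]

-- ===== PORT B =====
-- -((from_pid - to_pid) // n_threads) is Source B's integer ceiling division, ported directly.
def dataset_slices_alt (from_pid : Int) (to_pid : Int) (n_threads : Int) : List (List (String × Int)) :=
  let d := -(PySem.Int.floordiv (from_pid - to_pid) n_threads)
  let slices := (PySem.List.pyRange 0 (n_threads - 1) 1).map (fun i =>
    [("from_pid", from_pid + i * (d + 1)), ("to_pid", from_pid + i * (d + 1) + d)])
  slices ++ [[("from_pid", from_pid + max (n_threads - 1) 0 * (d + 1)), ("to_pid", to_pid)]]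

-- ===== PRECONDITION & SPEC =====
-- A raises ZeroDivisionError when n_threads = 0; excluded.
def Pre_dataset_slices (from_pid : Int) (to_pid : Int) (n_threads : Int) : Prop := n_threads ≠ 0
instance (from_pid : Int) (to_pid : Int) (n_threads : Int) : Decidable (Pre_dataset_slices from_pid to_pid n_threads) := by unfold Pre_dataset_slices; infer_instance
def pvWitness_dataset_slices : Int × Int × Int := (0, 10, 3)

def Spec_dataset_slices (from_pid : Int) (to_pid : Int) (n_threads : Int) (out : List (List (String × Int))) : Prop := out = dataset_slices_alt from_pid to_pid n_threads
instance (from_pid : Int) (to_pid : Int) (n_threads : Int) (out : List (List (String × Int))) : Decidable (Spec_dataset_slices from_pid to_pid n_threads out) := by unfold Spec_dataset_slices; infer_instance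

-- ===== CLAIM (what is proved, stated in full; the proofs are below) =====
def Claim_equal_dataset_slices : Prop := ∀ (from_pid : Int) (to_pid : Int) (n_threads : Int), Dom_dataset_slices from_pid to_pid n_threads → Pre_dataset_slices from_pid to_pid n_threads → Spec_dataset_slices from_pid to_pid n_threads (dataset_slices from_pid to_pid n_threads)

-- ===== LEMMAS AND PROOFS =====

-- A's loop over n steps: running state in closed form.
theorem loop_closed (d : Int) : ∀ (n : Nat) (cur : Int) (acc : List (List (String × Int))),
    (List.range n).foldl
      (fun (st : Int × List (List (String × Int))) (_k : Nat) =>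
        (st.1 + d + 1, st.2 ++ [[("from_pid", st.1), ("to_pid", st.1 + d)]]))
      (cur, acc)
    = (cur + n * (d + 1),
       acc ++ (List.range n).map (fun (k : Nat) =>
         [("from_pid", cur + (k : Int) * (d + 1)), ("to_pid", cur + (k : Int) * (d + 1) + d)])) := by
  intro n
  induction n with
  | zero => intro cur acc; simp
  | succ n ih =>
    intro cur acc
    rw [List.range_succ, List.foldl_append, ih, List.map_append]
    simp only [List.foldl_cons, List.foldl_nil, List.map_cons, List.map_nil, List.append_assoc,
      Prod.mk.injEq]
    constructor
    · push_cast; ring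
    · trivial

theorem dataset_slices_eq_alt (from_pid to_pid n_threads : Int) :
    dataset_slices from_pid to_pid n_threads = dataset_slices_alt from_pid to_pid n_threads := by
  unfold dataset_slices dataset_slices_alt
  simp only [neg_sub, PySem.List.pyRange_one, zero_add, sub_zero, List.foldl_map, List.map_map]
  rw [loop_closed, ← Int.ofNat_toNat (n_threads - 1)]
  simp [Function.comp]

-- ===== VERDICT (by name: the statement is the Claim_ definition above) =====
theorem dataset_slices_spec : Claim_equal_dataset_slices := by
  intro f t n _ _hpre
  show dataset_slices f t n = dataset_slices_alt f t n
  exact dataset_slices_eq_alt f t n
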